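-- pv_equiv track=rewrite | github.com/hienpham15/Codeforces_competitions | Codeforces_round739/D.py | func
-- ===== SOURCE A (Python) =====
-- def func(n, string):
--     tp, sp, taken = 0, 0, 0
--
--     while sp < len(n) and tp < len(string):
--         if n[sp] == string[tp]:
--             taken += 1
--             tp += 1
--         sp +=1
--
--     m = len(n) - taken + len(string) - taken
--     return m
-- ===== SOURCE B (Python) =====
-- def func(n, string):
--     # Build a per-character index of positions in n once; then for each character
--     # of string, binary-search its position list for the first occurrence at or
--     # after the current cursor (the subsequence-automaton / occurrence-index method).
--     pos = {}
--     for i, c in enumerate(n):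
--         pos.setdefault(c, []).append(i)
--     taken = 0
--     cur = 0
--     for c in string:
--         ps = pos.get(c, [])
--         lo, hi = 0, len(ps)
--         while lo < hi:
--             mid = (lo + hi) // 2
--             if ps[mid] < cur:
--                 lo = mid + 1
--             else:
--                 hi = mid
--         if lo == len(ps):
--             break
--         taken += 1
--         cur = ps[lo] + 1
--     return len(n) - taken + len(string) - taken
-- ===== Notes on version B (the rewrite author's own statement) =====
-- stated objective: alternative
-- what changed: Instead of A's single two-pointer scan of n, B builds a per-character index of n's positions once and, for each character of string, binary-searches that character's position list for the first occurrence at or after the cursor (the occurrence-index / subsequence-automaton method).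
import Mathlib
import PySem

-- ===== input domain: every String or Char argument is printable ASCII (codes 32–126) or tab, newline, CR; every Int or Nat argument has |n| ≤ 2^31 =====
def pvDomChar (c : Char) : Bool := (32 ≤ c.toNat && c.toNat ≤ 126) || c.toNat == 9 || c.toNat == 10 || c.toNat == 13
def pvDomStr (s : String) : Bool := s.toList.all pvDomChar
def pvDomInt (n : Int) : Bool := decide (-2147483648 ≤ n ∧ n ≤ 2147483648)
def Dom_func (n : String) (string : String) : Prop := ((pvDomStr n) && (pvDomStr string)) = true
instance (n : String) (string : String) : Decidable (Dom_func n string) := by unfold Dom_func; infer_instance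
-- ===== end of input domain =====

-- B replaces A's two-pointer scan of n by a per-character occurrence index of n
-- built once, with a hand-written binary search for the next occurrence (alternative algorithm).


-- ===== PORT A =====
-- A's while-loop: sp walks n, tp walks string; a matching char advances both and bumps taken.
def funcLoopA : List Char → List Char → Int
  | [], _ => 0
  | _ :: _, [] => 0
  | s :: ss, t :: ts =>
      if s = t then 1 + funcLoopA ss ts else funcLoopA ss (t :: ts)

def func (n : String) (string : String) : Int :=
  let taken := funcLoopA n.toList string.toList
  (n.toList.length : Int) - taken + (string.toList.length : Int) - taken

-- ===== PORT B =====
-- pos.setdefault(c, []).append(i): insert overwrites in place, new keys append — exactly Python's dict.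
def posIndex (l : List (Int × Char)) : PySem.Dict Char (List Int) :=
  l.foldl (fun d ic => d.insert ic.2 (d.getD ic.2 [] ++ [ic.1])) PySem.Dict.empty

-- the hand-written bisect_left of Source B; ps[mid] via getD is exact here because every
-- call keeps 0 ≤ lo ≤ mid < hi ≤ len ps, so the index is always in range.
def funcBisect (ps : List Int) (cur : Int) (lo hi : Nat) : Nat :=
  if h : lo < hi then
    let mid := (lo + hi) / 2
    if ps.getD mid 0 < cur then funcBisect ps cur (mid + 1) hi
    else funcBisect ps cur lo mid
  else lo
termination_by hi - lo
decreasing_by all_goals omega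

-- the for-loop over string: returns taken; `break` = stop recursing.
def funcLoopB (pos : PySem.Dict Char (List Int)) : List Char → Int → Int
  | [], _ => 0
  | c :: cs, cur =>
      let ps := pos.getD c []
      let lo := funcBisect ps cur 0 ps.length
      if lo = ps.length then 0
      else 1 + funcLoopB pos cs (ps.getD lo 0 + 1)

def func_alt (n : String) (string : String) : Int :=
  let pos := posIndex (PySem.List.enumerate n.toList)
  let taken := funcLoopB pos string.toList 0
  (n.toList.length : Int) - taken + (string.toList.length : Int) - taken

-- ===== PRECONDITION & SPEC =====
def Spec_func (n : String) (string : String) (out : Int) : Prop := out = func_alt n string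
instance (n : String) (string : String) (out : Int) : Decidable (Spec_func n string out) := by unfold Spec_func; infer_instance

-- ===== CLAIM (what is proved, stated in full; the proofs are below) =====
def Claim_equal_func : Prop := ∀ (n : String) (string : String), Dom_func n string → Spec_func n string (func n string)

-- ===== LEMMAS AND PROOFS =====

-- reference form of the greedy match: repeatedly find the first occurrence of the head.
def funcRef : List Char → List Char → Int
  | _, [] => 0
  | ns, c :: cs =>
      match ns.findIdx? (fun x => x == c) with
      | none => 0
      | some i => 1 + funcRef (ns.drop (i + 1)) cs

-- positions of c in ns, as Ints starting at offset o (specification of the dict's value at c).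
def idxFrom (c : Char) : List Char → Int → List Int
  | [], _ => []
  | x :: xs, o => if x = c then o :: idxFrom c xs (o + 1) else idxFrom c xs (o + 1)

theorem funcLoopA_eq_ref (cs ns : List Char) : funcLoopA ns cs = funcRef ns cs := by
  induction cs generalizing ns with
  | nil => cases ns <;> rfl
  | cons c cs ih =>
      induction ns with
      | nil => rfl
      | cons x xs ihn =>
          by_cases h : x = c
          · simp [funcLoopA, funcRef, List.findIdx?_cons, h, ih]
          · have hb : (x == c) = false := by simp [h]
            simp only [funcLoopA, if_neg h, ihn]
            simp [funcRef, List.findIdx?_cons, hb]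
            cases hfi : xs.findIdx? (fun x => x == c) <;> simp

theorem idxFrom_le (c : Char) (ns : List Char) (o : Int) :
    ∀ x ∈ idxFrom c ns o, o ≤ x := by
  induction ns generalizing o with
  | nil => simp [idxFrom]
  | cons y ys ih =>
      intro x hx
      simp only [idxFrom] at hx
      split_ifs at hx with h
      · rcases List.mem_cons.1 hx with rfl | hx
        · omega
        · have := ih (o + 1) x hx; omega
      · have := ih (o + 1) x hx; omega

theorem idxFrom_pairwise (c : Char) (ns : List Char) (o : Int) :
    (idxFrom c ns o).Pairwise (· < ·) := by
  induction ns generalizing o with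
  | nil => simp [idxFrom]
  | cons y ys ih =>
      simp only [idxFrom]
      split_ifs with h
      · exact List.Pairwise.cons (fun x hx => by have := idxFrom_le c ys (o + 1) x hx; omega) (ih (o + 1))
      · exact ih (o + 1)

-- the dict value at c is exactly idxFrom over the enumerated tail.
theorem posIndex_getD (l : List (Int × Char)) (d : PySem.Dict Char (List Int)) (c : Char) :
    (l.foldl (fun d ic => d.insert ic.2 (d.getD ic.2 [] ++ [ic.1])) d).getD c []
      = d.getD c [] ++ (l.filter (fun ic => ic.2 == c)).map (·.1) := by
  induction l generalizing d with
  | nil => simp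
  | cons p l ih =>
      simp only [List.foldl_cons, ih, List.filter_cons]
      by_cases h : p.2 = c
      · simp [h]
      · have hb : (p.2 == c) = false := by simp [h]
        simp [hb, PySem.Dict.getD_insert, Ne.symm h]

theorem enumerate_filter_map (c : Char) (ns : List Char) (s : Int) :
    ((PySem.List.enumerate ns s).filter (fun ic => ic.2 == c)).map (·.1) = idxFrom c ns s := by
  induction ns generalizing s with
  | nil => simp [PySem.List.enumerate_nil, idxFrom]
  | cons x xs ih =>
      rw [PySem.List.enumerate_cons]
      by_cases h : x = c
      · simp [h, idxFrom, ih]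
      · have hb : (x == c) = false := by simp [h]
        simp [hb, idxFrom, h, ih]

theorem pos_getD_eq (ns : List Char) (c : Char) :
    (posIndex (PySem.List.enumerate ns)).getD c [] = idxFrom c ns 0 := by
  unfold posIndex
  rw [posIndex_getD, PySem.Dict.getD_empty]
  simpa using enumerate_filter_map c ns 0

-- the sorted-prefix property: elements < cur form exactly the first countP elements.
theorem sorted_prefix_lt (ps : List Int) (cur : Int) (hs : ps.Pairwise (· < ·)) :
    ∀ j, j < ps.length → (ps.getD j 0 < cur ↔ j < ps.countP (fun x => decide (x < cur))) := by
  induction ps with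
  | nil => intro j hj; simp at hj
  | cons a l ih =>
      have ha := (List.pairwise_cons.1 hs).1
      have hl := (List.pairwise_cons.1 hs).2
      intro j hj
      by_cases hac : a < cur
      · have hcnt : (a :: l).countP (fun x => decide (x < cur))
            = l.countP (fun x => decide (x < cur)) + 1 := by
          simp [hac]
        cases j with
        | zero => simp [hcnt, hac]
        | succ j =>
            have := ih hl j (by simpa using hj)
            simpa [hcnt, List.getD_cons_succ] using this
      · have hz : l.countP (fun x => decide (x < cur)) = 0 := by
          rw [List.countP_eq_zero]
          intro x hx
          have := ha x hx
          simp; omega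
        have hcnt : (a :: l).countP (fun x => decide (x < cur)) = 0 := by
          simp [hac, hz]
        rw [hcnt]
        cases j with
        | zero => simpa using hac
        | succ j =>
            simp only [List.getD_cons_succ]
            constructor
            · intro hlt
              exfalso
              have hjl : j < l.length := by simpa using hj
              have hmem : l.getD j 0 ∈ l := by
                rw [List.getD_eq_getElem l 0 hjl]; exact List.getElem_mem hjl
              have := ha _ hmem
              omega
            · omega

-- the hand-written binary search returns countP (· < cur) on a strictly sorted list.
theorem funcBisect_eq_countP (ps : List Int) (cur : Int) (hs : ps.Pairwise (· < ·)) :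
    ∀ d lo hi, hi - lo ≤ d → lo ≤ ps.countP (fun x => decide (x < cur)) →
      ps.countP (fun x => decide (x < cur)) ≤ hi → hi ≤ ps.length →
      funcBisect ps cur lo hi = ps.countP (fun x => decide (x < cur)) := by
  intro d
  induction d with
  | zero =>
      intro lo hi hd h1 h2 h3
      rw [funcBisect]
      simp only [dif_neg (by omega : ¬ lo < hi)]
      omega
  | succ d ih =>
      intro lo hi hd h1 h2 h3
      rw [funcBisect]
      by_cases h : lo < hi
      · simp only [dif_pos h]
        set mid := (lo + hi) / 2 with hmid
        have hm1 : lo ≤ mid := by omega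
        have hm2 : mid < hi := by omega
        have hml : mid < ps.length := by omega
        have hiff := sorted_prefix_lt ps cur hs mid hml
        by_cases hlt : ps.getD mid 0 < cur
        · have := hiff.1 hlt
          simp only [if_pos hlt]
          exact ih (mid + 1) hi (by omega) (by omega) h2 h3
        · have : ¬ mid < ps.countP (fun x => decide (x < cur)) := fun hc => hlt (hiff.2 hc)
          simp only [if_neg hlt]
          exact ih lo mid (by omega) h1 (by omega) (by omega)
      · simp only [dif_neg h]; omega

-- the crux: countP/take/findIdx? bookkeeping of the occurrence list.
theorem idxFrom_countP (c : Char) (ns : List Char) (o : Int) (cur : Nat) :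
    (idxFrom c ns o).countP (fun x => decide (x < o + (cur : Int)))
      = (ns.take cur).countP (fun x => x == c) := by
  induction ns generalizing o cur with
  | nil => simp [idxFrom]
  | cons x xs ih =>
      cases cur with
      | zero =>
          rw [List.countP_eq_zero.2]
          · simp
          · intro y hy
            have := idxFrom_le c (x :: xs) o y hy
            simp; omega
      | succ cur =>
          have harg : o + ((cur + 1 : Nat) : Int) = (o + 1) + (cur : Int) := by push_cast; ring
          by_cases h : x = c
          · simp only [idxFrom, if_pos h, List.take_succ_cons, harg, List.countP_cons, ih (o + 1) cur]
            have h1 : decide (o < (o + 1) + (cur : Int)) = true := by simp; omega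
            have h2 : (x == c) = true := by simp [h]
            simp [h1, h2]
          · simp only [idxFrom, if_neg h, List.take_succ_cons, harg, List.countP_cons, ih (o + 1) cur]
            have h2 : (x == c) = false := by simp [h]
            simp [h2]

-- findIdx? on the dropped list versus the occurrence list.
theorem idxFrom_find (c : Char) (ns : List Char) (o : Int) (cur : Nat) :
    (match (ns.drop cur).findIdx? (fun x => x == c) with
      | none => (ns.take cur).countP (fun x => x == c) = (idxFrom c ns o).length
      | some i =>
          (ns.take cur).countP (fun x => x == c) < (idxFrom c ns o).length ∧
          (idxFrom c ns o).getD ((ns.take cur).countP (fun x => x == c)) 0 = o + (cur : Int) + (i : Int)) := by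
  induction ns generalizing o cur with
  | nil => simp [idxFrom]
  | cons x xs ih =>
      cases cur with
      | zero =>
          simp only [List.drop_zero, List.take_zero, List.countP_nil]
          by_cases h : x = c
          · have hb : (x == c) = true := by simp [h]
            simp [List.findIdx?_cons, idxFrom, h]
          · have hb : (x == c) = false := by simp [h]
            have := ih (o := o + 1) (cur := 0)
            simp only [List.drop_zero, List.take_zero, List.countP_nil] at this
            simp only [List.findIdx?_cons, hb, idxFrom, if_neg h]
            cases hfi : xs.findIdx? (fun x => x == c) with
            | none => simp only [hfi] at this; simpa using this
            | some i =>
                simp only [hfi] at this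
                simp only [Option.map_some]
                refine ⟨this.1, ?_⟩
                rw [this.2]; push_cast; ring
      | succ cur =>
          by_cases h : x = c
          · have ihx := ih (o := o + 1) (cur := cur)
            have hcc : ((x :: xs.take cur).countP (fun y => y == c))
                = (xs.take cur).countP (fun y => y == c) + 1 := by simp [h]
            simp only [List.drop_succ_cons, List.take_succ_cons, hcc, idxFrom, if_pos h]
            cases hfi : (xs.drop cur).findIdx? (fun x => x == c) with
            | none =>
                simp only [hfi] at ihx
                simp only [List.length_cons]; omega
            | some i =>
                simp only [hfi] at ihx
                refine ⟨by simp only [List.length_cons]; omega, ?_⟩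
                rw [List.getD_cons_succ, ihx.2]; push_cast; ring
          · have ihx := ih (o := o + 1) (cur := cur)
            have hcc : ((x :: xs.take cur).countP (fun y => y == c))
                = (xs.take cur).countP (fun y => y == c) := by simp [h]
            simp only [List.drop_succ_cons, List.take_succ_cons, hcc, idxFrom, if_neg h]
            cases hfi : (xs.drop cur).findIdx? (fun x => x == c) with
            | none => simp only [hfi] at ihx; simpa using ihx
            | some i =>
                simp only [hfi] at ihx
                refine ⟨ihx.1, ?_⟩
                rw [ihx.2]; push_cast; ring

theorem funcLoopB_eq_ref (ns : List Char) (cs : List Char) (cur : Nat) :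
    funcLoopB (posIndex (PySem.List.enumerate ns)) cs (cur : Int) = funcRef (ns.drop cur) cs := by
  induction cs generalizing cur with
  | nil => rfl
  | cons c cs ih =>
      simp only [funcLoopB, funcRef]
      rw [pos_getD_eq]
      set P := idxFrom c ns 0 with hP
      have hs : P.Pairwise (· < ·) := idxFrom_pairwise c ns 0
      have hbis : funcBisect P (cur : Int) 0 P.length
          = P.countP (fun x => decide (x < (cur : Int))) := by
        refine funcBisect_eq_countP P (cur : Int) hs P.length 0 P.length (by omega) (by omega)
          (List.countP_le_length) (le_refl _)
      have hcnt : P.countP (fun x => decide (x < (cur : Int)))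
          = (ns.take cur).countP (fun x => x == c) := by
        have := idxFrom_countP c ns 0 cur
        simpa using this
      have hfind := idxFrom_find c ns 0 cur
      rw [← hP] at hfind
      cases hfi : (ns.drop cur).findIdx? (fun x => x == c) with
      | none =>
          simp only [hfi] at hfind
          rw [hbis, hcnt, if_pos hfind]
      | some i =>
          simp only [hfi] at hfind
          rw [hbis, hcnt, if_neg (by omega)]
          have hv : P.getD ((ns.take cur).countP (fun x => x == c)) 0 + 1
              = ((cur + i + 1 : Nat) : Int) := by
            rw [hfind.2]; push_cast; ring
          rw [hv, ih (cur + i + 1)]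
          have hd : ns.drop (cur + i + 1) = (ns.drop cur).drop (i + 1) := by
            rw [List.drop_drop]; ring_nf
          rw [hd]

-- ===== VERDICT (by name: the statement is the Claim_ definition above) =====
theorem func_spec : Claim_equal_func := by
  intro n string _
  unfold Spec_func func func_alt
  have h0 := funcLoopB_eq_ref n.toList string.toList 0
  simp only [Nat.cast_zero, List.drop_zero] at h0
  simp only [funcLoopA_eq_ref, h0]
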